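-- pv_equiv track=rewrite | github.com/robkam/ytree | scripts/relay_core.py | resolve_action_needed
-- ===== SOURCE A (Python) =====
-- from typing import Any, Mapping
--
-- def resolve_action_needed(events: list[dict[str, Any]]) -> str:
--     resolution_events = {
--         "action_resolved",
--         "backend_completed",
--         "run_completed",
--         "run_failed",
--     }
--     for event in reversed(events):
--         event_type = str(event.get("event_type", "")).strip()
--         if event_type in resolution_events:
--             return "none"
--         if event_type == "action_needed":
--             message = str(event.get("message", "")).strip()
--             return message or "maintainer update required"
--     return "none"
-- ===== SOURCE B (Python) =====
-- def resolve_action_needed(events):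
--     relevant_types = {
--         "action_resolved",
--         "backend_completed",
--         "run_completed",
--         "run_failed",
--         "action_needed",
--     }
--     last = None
--     for event in events:
--         if str(event.get("event_type", "")).strip() in relevant_types:
--             last = event
--     if last is None:
--         return "none"
--     if str(last.get("event_type", "")).strip() != "action_needed":
--         return "none"
--     message = str(last.get("message", "")).strip()
--     return message or "maintainer update required"
-- ===== Notes on version B (the rewrite author's own statement) =====
-- stated objective: alternative
-- what changed: Replaces A's reversed scan with early returns by a forward full pass that keeps the last event whose stripped type is relevant (resolution or action_needed) and decides the status once after the loop.
import Mathlib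
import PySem

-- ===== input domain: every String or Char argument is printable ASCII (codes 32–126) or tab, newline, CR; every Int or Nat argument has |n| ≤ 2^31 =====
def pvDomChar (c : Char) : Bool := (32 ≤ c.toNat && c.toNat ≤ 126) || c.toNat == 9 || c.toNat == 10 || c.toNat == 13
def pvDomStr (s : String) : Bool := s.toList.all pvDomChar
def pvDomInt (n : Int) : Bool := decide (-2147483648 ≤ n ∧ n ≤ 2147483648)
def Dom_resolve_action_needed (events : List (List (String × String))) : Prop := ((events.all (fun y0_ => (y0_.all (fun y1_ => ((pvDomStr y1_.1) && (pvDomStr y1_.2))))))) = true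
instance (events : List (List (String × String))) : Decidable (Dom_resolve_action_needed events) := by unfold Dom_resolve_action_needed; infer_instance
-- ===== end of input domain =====

-- B replaces A's reversed scan with early exit by a forward full pass keeping the last
-- relevant event, deciding the status once after the loop (alternative decomposition).

-- ===== PORT A =====
-- dict.get(key, "") on the association list: first match, "" if absent (str() on a str is identity)
def pvGet (e : List (String × String)) (k : String) : String :=
  match e.find? (fun p => p.1 == k) with
  | some p => p.2
  | none => ""

def resolutionEvents : PySem.Set String :=
  PySem.Set.ofList ["action_resolved", "backend_completed", "run_completed", "run_failed"]

def goA : List (List (String × String)) → String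
  | [] => "none"
  | e :: rest =>
    let event_type := PySem.Str.strip (pvGet e "event_type")
    if PySem.Set.contains resolutionEvents event_type then "none"
    else if event_type == "action_needed" then
      let message := PySem.Str.strip (pvGet e "message")
      if message == "" then "maintainer update required" else message
    else goA rest

def resolve_action_needed (events : List (List (String × String))) : String :=
  goA events.reverse

-- ===== PORT B =====
def relevantTypes : PySem.Set String :=
  PySem.Set.ofList ["action_resolved", "backend_completed", "run_completed", "run_failed", "action_needed"]

def isRelevant (e : List (String × String)) : Bool :=
  PySem.Set.contains relevantTypes (PySem.Str.strip (pvGet e "event_type"))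

def resolve_action_needed_alt (events : List (List (String × String))) : String :=
  let last := events.foldl
    (fun acc e => if isRelevant e then some e else acc)
    (none : Option (List (String × String)))
  match last with
  | none => "none"
  | some e =>
    if PySem.Str.strip (pvGet e "event_type") == "action_needed" then
      let message := PySem.Str.strip (pvGet e "message")
      if message == "" then "maintainer update required" else message
    else "none"

-- ===== PRECONDITION & SPEC =====
def Spec_resolve_action_needed (events : List (List (String × String))) (out : String) : Prop := out = resolve_action_needed_alt events
instance (events : List (List (String × String))) (out : String) : Decidable (Spec_resolve_action_needed events out) := by unfold Spec_resolve_action_needed; infer_instance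

-- ===== CLAIM (what is proved, stated in full; the proofs are below) =====
def Claim_equal_resolve_action_needed : Prop := ∀ (events : List (List (String × String))), Dom_resolve_action_needed events → Spec_resolve_action_needed events (resolve_action_needed events)

-- ===== LEMMAS AND PROOFS =====
-- "finishB" is B's post-loop decision, written as a function of the saved event
def finishB : Option (List (String × String)) → String
  | none => "none"
  | some e =>
    if PySem.Str.strip (pvGet e "event_type") == "action_needed" then
      let message := PySem.Str.strip (pvGet e "message")
      if message == "" then "maintainer update required" else message
    else "none"

theorem foldl_last (l : List (List (String × String)))
    (acc : Option (List (String × String))) :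
    l.foldl (fun acc e => if isRelevant e then some e else acc) acc
      = (l.reverse.find? isRelevant).or acc := by
  induction l generalizing acc with
  | nil => simp
  | cons e l ih =>
    simp only [List.foldl_cons, ih, List.reverse_cons, List.find?_append]
    cases h : l.reverse.find? isRelevant
    · simp [List.find?]
      cases hr : isRelevant e
      · simp [hr]
      · simp [hr]
    · simp

theorem resolutionEvents_eval :
    resolutionEvents = ["action_resolved", "backend_completed", "run_completed", "run_failed"] := by
  decide

theorem relevantTypes_eval :
    relevantTypes = ["action_resolved", "backend_completed", "run_completed", "run_failed", "action_needed"] := by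
  decide

theorem isRelevant_eq (e : List (String × String)) :
    isRelevant e
      = (PySem.Set.contains resolutionEvents (PySem.Str.strip (pvGet e "event_type"))
          || (PySem.Str.strip (pvGet e "event_type") == "action_needed")) := by
  simp only [isRelevant, relevantTypes_eval, resolutionEvents_eval,
    PySem.Set.contains_eq_listContains, List.contains_cons]
  simp [Bool.or_assoc]

theorem res_not_action (t : String)
    (h : PySem.Set.contains resolutionEvents t = true) :
    (t == "action_needed") = false := by
  rw [resolutionEvents_eval] at h
  simp only [PySem.Set.contains_eq_listContains, List.contains_cons, List.contains_nil,
    Bool.or_false, Bool.or_eq_true, beq_iff_eq] at h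
  rcases h with h | h | h | h <;> subst h <;> decide

theorem goA_eq_finish (l : List (List (String × String))) :
    goA l = finishB (l.find? isRelevant) := by
  induction l with
  | nil => rfl
  | cons e l ih =>
    cases hb1 : PySem.Set.contains resolutionEvents (PySem.Str.strip (pvGet e "event_type")) with
    | true =>
      have hmem : PySem.Str.strip (pvGet e "event_type") ∈ resolutionEvents := by
        simpa using hb1
      have hne : PySem.Str.strip (pvGet e "event_type") ≠ "action_needed" := by
        simpa using res_not_action _ hb1
      have hrel : isRelevant e = true := by rw [isRelevant_eq, hb1]; rfl
      simp [goA, hrel, finishB, hmem, hne]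
    | false =>
      have hmem : PySem.Str.strip (pvGet e "event_type") ∉ resolutionEvents := by
        simpa using hb1
      cases hb2 : (PySem.Str.strip (pvGet e "event_type") == "action_needed") with
      | true =>
        have heq : PySem.Str.strip (pvGet e "event_type") = "action_needed" := by
          simpa using hb2
        have hrel : isRelevant e = true := by rw [isRelevant_eq, hb1, hb2]; rfl
        have hnotin : "action_needed" ∉ resolutionEvents := by
          rw [resolutionEvents_eval]; decide
        simp [goA, hrel, finishB, heq, hnotin]
      | false =>
        have hne : PySem.Str.strip (pvGet e "event_type") ≠ "action_needed" := by
          simpa using hb2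
        have hrel : isRelevant e = false := by rw [isRelevant_eq, hb1, hb2]; rfl
        simp [goA, hrel, hmem, hne, ih]

-- ===== VERDICT (by name: the statement is the Claim_ definition above) =====
theorem resolve_action_needed_spec : Claim_equal_resolve_action_needed := by
  intro events _
  show resolve_action_needed events = resolve_action_needed_alt events
  unfold resolve_action_needed resolve_action_needed_alt
  rw [goA_eq_finish, foldl_last]
  cases events.reverse.find? isRelevant <;> rfl
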